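-- pv_equiv track=rewrite | github.com/hamadhassan/University-Student-DiaryManagement-System_PY | UniversityStudentDiaryManagementSystem-WithoutClasses_PY/Program.py | _seperateField
-- ===== SOURCE A (Python) =====
-- def _seperateField(record, field):
--     comma = 1
--     item = ""
--     x = 0
--     while x < len(record):
--         if record[x] == ',':
--             comma += 1
--         elif comma == field:
--             item = item + record[x]
--         x += 1
--     return item # end of function
-- ===== SOURCE B (Python) =====
-- def _seperateField(record, field):
--     parts = record.split(',')
--     if 1 <= field <= len(parts):
--         return parts[field - 1]
--     return ""
-- ===== Notes on version B (the rewrite author's own statement) =====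
-- stated objective: idiomatic
-- what changed: Replaced the character-by-character comma-counting scan with a single record.split(',') followed by one bounds-checked index lookup.
import Mathlib
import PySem

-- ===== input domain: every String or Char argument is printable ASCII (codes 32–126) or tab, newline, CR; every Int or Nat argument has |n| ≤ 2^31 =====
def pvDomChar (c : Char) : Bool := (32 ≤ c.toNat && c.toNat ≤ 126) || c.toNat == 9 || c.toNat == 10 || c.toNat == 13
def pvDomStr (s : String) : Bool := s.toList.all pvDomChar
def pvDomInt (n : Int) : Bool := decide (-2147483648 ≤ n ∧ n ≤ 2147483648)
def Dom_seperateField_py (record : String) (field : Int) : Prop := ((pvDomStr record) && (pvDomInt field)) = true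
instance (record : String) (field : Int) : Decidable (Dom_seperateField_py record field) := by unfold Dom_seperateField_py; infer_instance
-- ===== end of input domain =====

-- B replaces A's comma-counting character scan by split-on-comma plus one bounds-checked index lookup (idiomatic).

-- ===== PORT A =====
-- literal port of A's while loop: state (comma, item), scanning the characters in order
def seperateField_py (record : String) (field : Int) : String :=
  let st := record.toList.foldl
    (fun (p : Int × List Char) c =>
      if c = ',' then (p.1 + 1, p.2)
      else if p.1 = field then (p.1, p.2 ++ [c]) else p)
    ((1 : Int), ([] : List Char))
  String.ofList st.2

-- ===== PORT B =====
-- record.split(',') is List.splitOn ',' on the characters (exact for a one-character separator)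
def seperateField_py_alt (record : String) (field : Int) : String :=
  let parts := record.toList.splitOn ','
  if 1 ≤ field ∧ field ≤ (parts.length : Int) then
    String.ofList (PySem.List.pyGetD parts (field - 1) [])
  else ""

-- ===== PRECONDITION & SPEC =====
def Spec_seperateField_py (record : String) (field : Int) (out : String) : Prop := out = seperateField_py_alt record field
instance (record : String) (field : Int) (out : String) : Decidable (Spec_seperateField_py record field out) := by unfold Spec_seperateField_py; infer_instance

-- ===== CLAIM (what is proved, stated in full; the proofs are below) =====
def Claim_equal_seperateField_py : Prop := ∀ (record : String) (field : Int), Dom_seperateField_py record field → Spec_seperateField_py record field (seperateField_py record field)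

-- ===== LEMMAS AND PROOFS =====

-- A's scan started with counter k collects exactly segment number (field - k) of the comma-split.
lemma pv_scan_eq (field : Int) (cs : List Char) (k : Int) (acc : List Char) :
    (cs.foldl
      (fun (p : Int × List Char) c =>
        if c = ',' then (p.1 + 1, p.2)
        else if p.1 = field then (p.1, p.2 ++ [c]) else p)
      (k, acc)).2
    = acc ++ (if k ≤ field then (cs.splitOn ',').getD (field - k).toNat [] else []) := by
  induction cs generalizing k acc with
  | nil => by_cases h : k ≤ field <;> simp [List.splitOn, List.splitOnP_nil, h]
  | cons c cs ih =>
    simp only [List.foldl_cons]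
    by_cases hc : c = ','
    · subst hc
      rw [show (if (',' : Char) = ',' then (k + 1, acc) else if k = field then (k, acc ++ [',']) else (k, acc)) = (k + 1, acc) by simp]
      rw [ih]
      have hsplit : (',' :: cs).splitOn ',' = [] :: cs.splitOn ',' := by
        simp [List.splitOn, List.splitOnP_cons]
      rw [hsplit]
      by_cases h1 : k + 1 ≤ field
      · have h0 : k ≤ field := by omega
        simp only [h1, h0, if_true]
        have : (field - k).toNat = (field - (k + 1)).toNat + 1 := by omega
        rw [this]
        simp
      · by_cases h0 : k ≤ field
        · have hk : field = k := by omega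
          simp [hk]
        · simp [h1, h0]
    · have hsplit : (c :: cs).splitOn ',' = ((cs.splitOn ',').modifyHead (c :: ·)) := by
        simp [List.splitOn, List.splitOnP_cons, hc]
      obtain ⟨h, t, hht⟩ : ∃ h t, cs.splitOn ',' = h :: t := by
        rcases e : cs.splitOn ',' with _ | ⟨h, t⟩
        · exact absurd e (by simpa [List.splitOn] using List.splitOnP_ne_nil (fun x => x == ',') cs)
        · exact ⟨h, t, rfl⟩
      by_cases hk : k = field
      · subst hk
        rw [show (if c = ',' then (k + 1, acc) else if k = k then (k, acc ++ [c]) else (k, acc)) = (k, acc ++ [c]) by simp [hc]]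
        rw [ih, hsplit, hht]
        simp
      · rw [show (if c = ',' then (k + 1, acc) else if k = field then (k, acc ++ [c]) else (k, acc)) = (k, acc) by simp [hc, hk]]
        rw [ih, hsplit, hht]
        by_cases h0 : k ≤ field
        · have : 0 < field - k := by omega
          have : ∃ m : Nat, (field - k).toNat = m + 1 := ⟨(field - k).toNat - 1, by omega⟩
          obtain ⟨m, hm⟩ := this
          simp [h0, hm]
        · simp [h0]

-- ===== VERDICT (by name: the statement is the Claim_ definition above) =====
theorem seperateField_py_spec : Claim_equal_seperateField_py := by
  intro record field _
  unfold Spec_seperateField_py seperateField_py seperateField_py_alt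
  simp only []
  rw [pv_scan_eq]
  set parts := record.toList.splitOn ',' with hp
  by_cases hin : 1 ≤ field ∧ field ≤ (parts.length : Int)
  · have hlt : (field - 1).toNat < parts.length := by omega
    have h1 : (1 : Int) ≤ field := hin.1
    rw [if_pos hin, if_pos h1]
    rw [PySem.List.pyGetD_eq_getElem parts [] (by omega) (by have := hin.2; omega)]
    rw [List.getD_eq_getElem _ _ hlt]
    simp
  · rw [if_neg hin]
    by_cases h1 : (1 : Int) ≤ field
    · have : parts.length ≤ (field - 1).toNat := by omega
      rw [if_pos h1, List.getD_eq_default _ _ (by omega)]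
      rfl
    · rw [if_neg h1]
      rfl
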